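-- pv_equiv track=rewrite | github.com/AnticPan/scripts | sents_diff_vis.py | mark
-- ===== SOURCE A (Python) =====
-- def mark(s, lcs):
--     out = ""
--     lcs_ptr = 0
--     diff = ""
--     for w in s:
--         if lcs_ptr < len(lcs) and w == lcs[lcs_ptr]:
--             if diff:
--                 out += '<text style="color:red;">'+ diff+ '</text>'
--                 diff = ""
--             out += w + " "
--             lcs_ptr += 1
--         else:
--             diff += w + " "
--     if diff:
--         out += '<text style="color:red;">'+ diff+ '</text>'
--     return "<td>"+out+"</td>"
-- ===== SOURCE B (Python) =====
-- from itertools import groupby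
--
-- def mark(s, lcs):
--     # pass 1: flag each word as matched (consumes lcs pointer) or not
--     ptr = 0
--     flagged = []
--     for w in s:
--         hit = ptr < len(lcs) and w == lcs[ptr]
--         if hit:
--             ptr += 1
--         flagged.append((w, hit))
--     # pass 2: group consecutive words by flag; wrap unmatched runs in red
--     out = ""
--     for hit, grp in groupby(flagged, key=lambda p: p[1]):
--         words = "".join(w + " " for w, _ in grp)
--         if hit:
--             out += words
--         else:
--             out += '<text style="color:red;">' + words + '</text>'
--     return "<td>" + out + "</td>"
-- ===== Notes on version B (the rewrite author's own statement) =====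
-- stated objective: alternative
-- what changed: Splits A's single stateful loop (accumulating a pending diff string and flushing it on matches) into two passes: one pass flags each word as matched/unmatched, then itertools.groupby renders each maximal run, wrapping unmatched runs in red.
import Mathlib
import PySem

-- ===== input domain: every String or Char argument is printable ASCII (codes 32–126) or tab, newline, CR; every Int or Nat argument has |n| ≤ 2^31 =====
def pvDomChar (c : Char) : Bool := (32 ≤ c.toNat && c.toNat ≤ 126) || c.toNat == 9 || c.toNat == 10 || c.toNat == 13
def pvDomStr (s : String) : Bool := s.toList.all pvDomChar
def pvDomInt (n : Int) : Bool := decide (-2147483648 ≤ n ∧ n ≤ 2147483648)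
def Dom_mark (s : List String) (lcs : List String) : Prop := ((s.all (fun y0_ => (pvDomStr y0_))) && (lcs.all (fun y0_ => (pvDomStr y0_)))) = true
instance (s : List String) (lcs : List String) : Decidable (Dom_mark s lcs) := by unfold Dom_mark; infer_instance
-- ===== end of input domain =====

-- B separates A's single stateful loop into two passes: flag each word as matched/unmatched, then render maximal runs (groupby), wrapping unmatched runs in red; return value is identical.


-- ===== PORT A =====
-- A's loop over s with state (out, lcs_ptr, diff); trailing-diff flush folded into the [] case.
def markLoop (lcs : List String) : List String → Nat → String → String → String
  | [], _, out, diff =>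
    if diff ≠ "" then out ++ "<text style=\"color:red;\">" ++ diff ++ "</text>" else out
  | w :: ws, ptr, out, diff =>
    if ptr < lcs.length ∧ lcs.getD ptr "" = w then
      (if diff ≠ "" then
        markLoop lcs ws (ptr + 1) (out ++ "<text style=\"color:red;\">" ++ diff ++ "</text>" ++ w ++ " ") ""
      else
        markLoop lcs ws (ptr + 1) (out ++ w ++ " ") "")
    else
      markLoop lcs ws ptr out (diff ++ w ++ " ")

def mark (s : List String) (lcs : List String) : String :=
  "<td>" ++ markLoop lcs s 0 "" "" ++ "</td>"

-- ===== PORT B =====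
-- pass 1 of Source B: flag each word
def annotate (lcs : List String) : List String → Nat → List (String × Bool)
  | [], _ => []
  | w :: ws, ptr =>
    if ptr < lcs.length ∧ lcs.getD ptr "" = w then
      (w, true) :: annotate lcs ws (ptr + 1)
    else
      (w, false) :: annotate lcs ws ptr

-- itertools.groupby on the flag (hand-ported: maximal runs of equal flag, in order)
def groupsAux : Bool → List String → List (String × Bool) → List (Bool × List String)
  | b, run, [] => [(b, run.reverse)]
  | b, run, (w, b') :: rest =>
    if b' = b then groupsAux b (w :: run) rest
    else (b, run.reverse) :: groupsAux b' [w] rest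

def groups : List (String × Bool) → List (Bool × List String)
  | [] => []
  | (w, b) :: rest => groupsAux b [w] rest

-- pass 2 of Source B: render one run
def renderGroup (g : Bool × List String) : String :=
  let words := String.join (g.2.map (fun w => w ++ " "))
  if g.1 then words else "<text style=\"color:red;\">" ++ words ++ "</text>"

def mark_alt (s : List String) (lcs : List String) : String :=
  "<td>" ++ String.join ((groups (annotate lcs s 0)).map renderGroup) ++ "</td>"

-- ===== PRECONDITION & SPEC =====
def Spec_mark (s : List String) (lcs : List String) (out : String) : Prop := out = mark_alt s lcs
instance (s : List String) (lcs : List String) (out : String) : Decidable (Spec_mark s lcs out) := by unfold Spec_mark; infer_instance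

-- ===== CLAIM (what is proved, stated in full; the proofs are below) =====
def Claim_equal_mark : Prop := ∀ (s : List String) (lcs : List String), Dom_mark s lcs → Spec_mark s lcs (mark s lcs)

-- ===== LEMMAS AND PROOFS =====

-- common reference rendering: process the flagged list with a pending-diff accumulator
def flushR (d : String) : String :=
  if d ≠ "" then "<text style=\"color:red;\">" ++ d ++ "</text>" else ""

def R : String → List (String × Bool) → String
  | d, [] => flushR d
  | d, (w, true) :: rest => flushR d ++ w ++ " " ++ R "" rest
  | d, (w, false) :: rest => R (d ++ w ++ " ") rest

def joinSp (ws : List String) : String := String.join (ws.map (fun w => w ++ " "))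

theorem flushR_empty : flushR "" = "" := by simp [flushR]

theorem flushR_of_ne (d : String) (h : d ≠ "") :
    flushR d = "<text style=\"color:red;\">" ++ d ++ "</text>" := by simp [flushR, h]

theorem foldl_app (a : String) (l : List String) :
    l.foldl (fun r s => r ++ s) a = a ++ l.foldl (fun r s => r ++ s) "" := by
  induction l generalizing a with
  | nil => simp
  | cons x t ih =>
    simp only [List.foldl]
    rw [ih (a ++ x), ih ("" ++ x), String.empty_append, String.append_assoc]

theorem join_cons (x : String) (t : List String) :
    String.join (x :: t) = x ++ String.join t := by
  show (x :: t).foldl (fun r s => r ++ s) "" = x ++ t.foldl (fun r s => r ++ s) ""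
  simp only [List.foldl]
  rw [foldl_app, String.empty_append]

theorem join_nil : String.join ([] : List String) = "" := rfl

theorem joinSp_cons (x : String) (t : List String) :
    joinSp (x :: t) = x ++ " " ++ joinSp t := by
  simp [joinSp, join_cons, String.append_assoc]

theorem joinSp_nil : joinSp [] = "" := rfl

theorem joinSp_one (x : String) : joinSp [x] = x ++ " " := by
  rw [joinSp_cons, joinSp_nil, String.append_empty]

theorem joinSp_append (a b : List String) : joinSp (a ++ b) = joinSp a ++ joinSp b := by
  induction a with
  | nil => simp [joinSp_nil]
  | cons x t ih => simp [joinSp_cons, ih, String.append_assoc]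

theorem joinSp_ne_empty (ws : List String) (h : ws ≠ []) : joinSp ws ≠ "" := by
  cases ws with
  | nil => exact absurd rfl h
  | cons x t =>
    intro hc
    rw [joinSp_cons] at hc
    have := congrArg String.length hc
    simp [String.length_append] at this

theorem renderGroup_eq (b : Bool) (ws : List String) :
    renderGroup (b, ws) =
      if b then joinSp ws else "<text style=\"color:red;\">" ++ joinSp ws ++ "</text>" := rfl

theorem markLoop_eq_R (lcs : List String) (s : List String) :
    ∀ (ptr : Nat) (out diff : String),
      markLoop lcs s ptr out diff = out ++ R diff (annotate lcs s ptr) := by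
  induction s with
  | nil =>
    intro ptr out diff
    simp only [markLoop, annotate, R, flushR]
    split <;> simp [String.append_assoc]
  | cons w ws ih =>
    intro ptr out diff
    by_cases h : ptr < lcs.length ∧ lcs.getD ptr "" = w
    · simp only [markLoop, annotate]
      rw [if_pos h, if_pos h]
      by_cases hd : diff = ""
      · subst hd
        rw [if_neg (by simp), ih]
        simp [R, flushR_empty, String.append_assoc, String.empty_append]
      · rw [if_pos hd, ih]
        simp [R, flushR_of_ne diff hd, String.append_assoc]
    · simp only [markLoop, annotate]
      rw [if_neg h, if_neg h, ih]
      simp [R]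

theorem groupsAux_eq_R :
    ∀ (rest : List (String × Bool)) (b : Bool) (run : List String), run ≠ [] →
      String.join ((groupsAux b run rest).map renderGroup) =
        (if b then joinSp run.reverse ++ R "" rest else R (joinSp run.reverse) rest) := by
  intro rest
  induction rest with
  | nil =>
    intro b run hrun
    have hne : run.reverse ≠ [] := by simpa using hrun
    rw [groupsAux, List.map_cons, List.map_nil, join_cons, join_nil, String.append_empty,
      renderGroup_eq]
    cases b
    · simp only [if_false, Bool.false_eq_true, R]
      rw [flushR_of_ne _ (joinSp_ne_empty _ hne)]
    · simp [R, flushR_empty]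
  | cons p rest ih =>
    intro b run hrun
    obtain ⟨w, b'⟩ := p
    have hrev : joinSp (run.reverse ++ [w]) = joinSp run.reverse ++ (w ++ " ") := by
      rw [joinSp_append, joinSp_one]
    by_cases hb : b' = b
    · subst hb
      rw [show groupsAux b' run ((w, b') :: rest) = groupsAux b' (w :: run) rest by
        rw [groupsAux]; simp]
      rw [ih b' (w :: run) (by simp), List.reverse_cons, hrev]
      cases b'
      · simp [R, String.append_assoc]
      · simp [R, flushR_empty, String.append_assoc, String.empty_append]
    · rw [show groupsAux b run ((w, b') :: rest) = (b, run.reverse) :: groupsAux b' [w] rest by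
        rw [groupsAux]; simp [hb]]
      rw [List.map_cons, join_cons, ih b' [w] (by simp), renderGroup_eq]
      have hne : run.reverse ≠ [] := by simpa using hrun
      cases b
      · have hb' : b' = true := by simpa using hb
        subst hb'
        simp only [if_true, if_false, Bool.false_eq_true, R]
        rw [List.reverse_singleton, flushR_of_ne _ (joinSp_ne_empty _ hne), joinSp_one, String.append_assoc]
        simp [String.append_assoc]
      · have hb' : b' = false := by simpa using hb
        subst hb'
        simp only [if_true, if_false, Bool.false_eq_true, R]
        rw [List.reverse_singleton, joinSp_one]
        simp [String.empty_append]

theorem groups_eq_R (ann : List (String × Bool)) :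
    String.join ((groups ann).map renderGroup) = R "" ann := by
  cases ann with
  | nil => simp [groups, join_nil, R, flushR_empty]
  | cons p rest =>
    obtain ⟨w, b⟩ := p
    simp only [groups]
    rw [groupsAux_eq_R rest b [w] (by simp)]
    cases b
    · simp [R, joinSp_one, String.empty_append]
    · simp [R, joinSp_one, flushR_empty, String.empty_append, String.append_assoc]

-- ===== VERDICT (by name: the statement is the Claim_ definition above) =====
theorem mark_spec : Claim_equal_mark := by
  intro s lcs _
  unfold Spec_mark mark mark_alt
  rw [markLoop_eq_R, groups_eq_R]
  simp
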